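-- pv_equiv track=rewrite | github.com/tommysgit/Coding-Test | 프로그래머스/lv2/60058. 괄호 변환/괄호 변환.py | solution
-- ===== SOURCE A (Python) =====
-- def solution(p):
--     answer = ''
--     def divide(w):
--         left = 0
--         right = 0
--         for i in range(len(w)):
--             if w[i] == "(":
--                 left += 1
--             else:
--                 right += 1
--             if left == right:
--                 standard = i + 1
--                 break
--
--         if standard == len(w) - 1:
--             return w, ""
--         else:
--             return w[:standard], w[standard:]
--     # 옳바른 문자열인지 판별
--     def is_correct(s):
--         stack = []
--         for i in s:
--             if i == "(":
--                 stack.append(i)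
--             else:
--                 if not stack:
--                     return 0
--                 tmp = stack.pop()
--                 if tmp != "(":
--                     return 0
--         return 1
--     def to_correct(u):
--         s = "("
--
--     # u는 균형잡힌 문자열, v는 빈 문자열일 수 있다.
--     def recursion_bracket(w):
--         # 1
--         if not w:
--             return ""
--         # 2
--         u, v = divide(w)
--         # 3
--         if is_correct(u):
--             if v:
--                 u = u + recursion_bracket(v)
--             return u
--         # 4
--         else:
--             tmp = "(" + recursion_bracket(v) + ")"
--             if len(u)>3:
--                 for i in range(1, len(u)-1):
--                     if u[i] == "(":
--                         tmp += ")"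
--                     else:
--                         tmp += "("
--             return tmp
--
--
--     answer = recursion_bracket(p)
--
--     return answer
-- ===== SOURCE B (Python) =====
-- def _split(w):
--     bal = 0
--     for i, c in enumerate(w):
--         bal += 1 if c == '(' else -1
--         if bal == 0:
--             return (w, '') if i + 1 == len(w) - 1 else (w[:i + 1], w[i + 1:])
--     raise ValueError('no balanced-count prefix')
--
--
-- def _prefix_ok(u):
--     bal = 0
--     for c in u:
--         bal += 1 if c == '(' else -1
--         if bal < 0:
--             return False
--     return True
--
--
-- def solution(p):
--     segs = []
--     w = p
--     while w:
--         u, w = _split(w)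
--         segs.append(u)
--     res = ''
--     for u in reversed(segs):
--         if _prefix_ok(u):
--             res = u + res
--         else:
--             wrapped = '(' + res + ')'
--             if len(u) > 3:
--                 wrapped += ''.join(')' if c == '(' else '(' for c in u[1:-1])
--             res = wrapped
--     return res
-- ===== Notes on version B (the rewrite author's own statement) =====
-- stated objective: alternative
-- what changed: Replaces A's recursion on the remainder with a two-phase iteration: a loop first slices p into its balanced-count prefix segments (one running balance counter instead of A's separate left/right counters), then a single reverse fold over the segment list rebuilds the answer, judging segment correctness by a prefix-balance scan instead of A's stack.
import Mathlib
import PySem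

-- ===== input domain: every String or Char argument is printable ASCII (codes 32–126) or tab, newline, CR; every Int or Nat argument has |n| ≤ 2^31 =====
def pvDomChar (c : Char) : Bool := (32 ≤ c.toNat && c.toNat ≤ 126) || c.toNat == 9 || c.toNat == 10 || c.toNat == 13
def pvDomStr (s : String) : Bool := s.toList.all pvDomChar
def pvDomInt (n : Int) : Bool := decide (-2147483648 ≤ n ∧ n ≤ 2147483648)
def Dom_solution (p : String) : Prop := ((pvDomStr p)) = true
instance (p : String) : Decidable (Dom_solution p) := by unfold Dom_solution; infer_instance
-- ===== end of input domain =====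

-- B replaces A's recursion with an explicit segment-splitting loop plus a reverse fold
-- (single balance counter and prefix-scan correctness instead of two counters and a stack);
-- same values on every input A returns on (Pre_solution = exactly those inputs).


-- ===== PORT A =====
-- divide's counting loop: left/right counters, break at left == right (returns standard = i+1)
def divLoopA : List Char → Nat → Nat → Nat → Option Nat
  | [], _, _, _ => none
  | c :: rest, left, right, i =>
    let left' := if c = '(' then left + 1 else left
    let right' := if c = '(' then right else right + 1
    if left' = right' then some (i + 1) else divLoopA rest left' right' (i + 1)

-- A's divide; `none` = Python's UnboundLocalError on `standard` (excluded by Pre_solution)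
def divideA (w : List Char) : Option (List Char × List Char) :=
  match divLoopA w 0 0 0 with
  | none => none
  | some s => if s = w.length - 1 then some (w, []) else some (w.take s, w.drop s)

-- A's is_correct stack loop (returns 0/1; Python truthiness = ≠ 0)
def icLoopA : List Char → List Char → Nat
  | [], _ => 1
  | c :: rest, stack =>
    if c = '(' then icLoopA rest ('(' :: stack)
    else
      match stack with
      | [] => 0
      | t :: st => if t ≠ '(' then 0 else icLoopA rest st

def isCorrectA (s : List Char) : Nat := icLoopA s []

-- the per-index flip loop of case 4 (over u[1:len(u)-1])
def flipLoopA : List Char → List Char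
  | [] => []
  | c :: rest => (if c = '(' then ')' else '(') :: flipLoopA rest

-- recursion_bracket, with fuel for termination (length decreases each call; p.length+1 suffices)
def recA : Nat → List Char → List Char
  | 0, _ => []
  | fuel + 1, w =>
    if w = [] then []
    else
      match divideA w with
      | none => []  -- Python raises here; outside Pre_solution
      | some (u, v) =>
        if isCorrectA u ≠ 0 then
          (if v ≠ [] then u ++ recA fuel v else u)
        else
          ('(' :: recA fuel v ++ [')']) ++
            (if u.length > 3 then flipLoopA ((u.drop 1).take (u.length - 2)) else [])

def solution (p : String) : String := String.mk (recA (p.toList.length + 1) p.toList)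

-- ===== PORT B =====
-- _split's scan: one running balance, first index where it returns to 0
def splitLoopB : List Char → Int → Nat → Option Nat
  | [], _, _ => none
  | c :: rest, bal, i =>
    let b := bal + (if c = '(' then 1 else -1)
    if b = 0 then some (i + 1) else splitLoopB rest b (i + 1)

-- B's _split; `none` = Python's ValueError (outside Pre_solution)
def splitB (w : List Char) : Option (List Char × List Char) :=
  match splitLoopB w 0 0 with
  | none => none
  | some s => if s = w.length - 1 then some (w, []) else some (w.take s, w.drop s)

-- phase 1: the while-loop collecting the segment list (fuel as in recA)
def segsB : Nat → List Char → List (List Char)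
  | 0, _ => []
  | fuel + 1, w =>
    if w = [] then []
    else
      match splitB w with
      | none => []
      | some (u, rest) => u :: segsB fuel rest

-- _prefix_ok: balance never drops below zero
def okLoopB : List Char → Int → Bool
  | [], _ => true
  | c :: rest, bal =>
    let b := bal + (if c = '(' then 1 else -1)
    if b < 0 then false else okLoopB rest b

def prefixOkB (u : List Char) : Bool := okLoopB u 0

-- phase 2: one step of the reverse fold
def stepB (res : List Char) (u : List Char) : List Char :=
  if prefixOkB u then u ++ res
  else
    '(' :: res ++ [')'] ++
      (if u.length > 3 then
        ((u.drop 1).take (u.length - 2)).map (fun c => if c = '(' then ')' else '(')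
      else [])

def buildB (segs : List (List Char)) : List Char := segs.reverse.foldl stepB []

def solution_alt (p : String) : String := String.mk (buildB (segsB (p.toList.length + 1) p.toList))

-- ===== PRECONDITION & SPEC =====
-- Pre_solution = exactly the inputs on which Python A returns normally: the balance returns to 0
-- at the end or (for strings of length ≥ 2) one character before the end; elsewhere A's divide
-- raises UnboundLocalError (and B's _split raises ValueError).
def Pre_solution (p : String) : Prop :=
  p.toList = [] ∨ 2 * p.toList.count '(' = p.toList.length ∨
    (2 ≤ p.toList.length ∧
      2 * (p.toList.take (p.toList.length - 1)).count '(' = p.toList.length - 1)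

instance (p : String) : Decidable (Pre_solution p) := by unfold Pre_solution; infer_instance

def pvWitness_solution : String := "(()())"

def Spec_solution (p : String) (out : String) : Prop := out = solution_alt p
instance (p : String) (out : String) : Decidable (Spec_solution p out) := by
  unfold Spec_solution; infer_instance

-- ===== CLAIM (what is proved, stated in full; the proofs are below) =====
def Claim_equal_solution : Prop :=
  ∀ (p : String), Dom_solution p → Pre_solution p → Spec_solution p (solution p)

-- ===== LEMMAS AND PROOFS =====

-- net balance of a list of characters ('(' = +1, anything else = -1); proof-side spec function
-- divide's left/right counting loop ≡ _split's single-balance loop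
theorem divLoop_eq_splitLoop :
    ∀ (w : List Char) (l r i : Nat), divLoopA w l r i = splitLoopB w ((l : Int) - r) i := by
  intro w
  induction w with
  | nil => intro l r i; rfl
  | cons c rest ih =>
    intro l r i
    by_cases hc : c = '(' <;>
      simp only [divLoopA, splitLoopB, hc, if_pos, if_false]
    · by_cases h : l + 1 = r
      · rw [if_pos h, if_pos (by omega)]
      · rw [if_neg h, if_neg (by omega), ih]
        congr 1; push_cast; omega
    · by_cases h : l = r + 1
      · rw [if_pos h, if_pos (by omega)]
      · rw [if_neg h, if_neg (by omega), ih]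
        congr 1; push_cast; omega

theorem divideA_eq_splitB (w : List Char) : divideA w = splitB w := by
  unfold divideA splitB
  rw [divLoop_eq_splitLoop]
  norm_num
theorem ic_iff_ok :
    ∀ (s : List Char) (n : Nat),
      (icLoopA s (List.replicate n '(') ≠ 0) ↔ (okLoopB s (n : Int) = true) := by
  intro s
  induction s with
  | nil => intro n; simp [icLoopA, okLoopB]
  | cons c rest ih =>
    intro n
    by_cases hc : c = '('
    · have h1 : icLoopA (c :: rest) (List.replicate n '(') =
          icLoopA rest (List.replicate (n + 1) '(') := by
        simp [icLoopA, hc, List.replicate_succ]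
      have h2 : okLoopB (c :: rest) (n : Int) = okLoopB rest ((n + 1 : Nat) : Int) := by
        simp only [okLoopB, hc, reduceIte]
        rw [if_neg (by omega)]
        norm_cast
      rw [h1, h2, ih]
    · cases n with
      | zero =>
        have h1 : icLoopA (c :: rest) [] = 0 := by
          simp [icLoopA, hc]
        have h2 : okLoopB (c :: rest) (0 : Int) = false := by
          simp [okLoopB, hc]
        simp [h1, h2]
      | succ k =>
        have h1 : icLoopA (c :: rest) (List.replicate (k + 1) '(') =
            icLoopA rest (List.replicate k '(') := by
          simp [icLoopA, hc, List.replicate_succ]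
        have h2 : okLoopB (c :: rest) ((k + 1 : Nat) : Int) = okLoopB rest ((k : Nat) : Int) := by
          simp only [okLoopB, hc, reduceIte]
          rw [if_neg (by omega)]
          congr 1
          omega
        rw [h1, h2, ih]

theorem flipLoopA_eq_map (l : List Char) :
    flipLoopA l = l.map (fun c => if c = '(' then ')' else '(') := by
  induction l with
  | nil => rfl
  | cons c rest ih => simp [flipLoopA, ih]

theorem splitLoop_some :
    ∀ (w : List Char) (b : Int) (i s : Nat), splitLoopB w b i = some s →
      i < s ∧ s ≤ i + w.length := by
  intro w
  induction w with
  | nil => intro b i s h; simp [splitLoopB] at h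
  | cons c rest ih =>
    intro b i s h
    simp only [splitLoopB] at h
    by_cases h0 : b + (if c = '(' then (1:Int) else -1) = 0
    · rw [if_pos h0] at h
      have hs : s = i + 1 := (Option.some.inj h).symm
      subst hs
      exact ⟨by omega, by simp⟩
    · rw [if_neg h0] at h
      obtain ⟨h1, h2⟩ := ih _ _ _ h
      exact ⟨by omega, by simp; omega⟩

theorem buildB_cons (u : List Char) (segs : List (List Char)) :
    buildB (u :: segs) = stepB (buildB segs) u := by
  simp [buildB, List.foldl_append]

theorem segsB_nil (f : Nat) : segsB f [] = [] := by cases f <;> rfl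

theorem main_lemma :
    ∀ (f : Nat) (w : List Char), w.length < f → recA f w = buildB (segsB f w) := by
  intro f
  induction f with
  | zero => intro w h; exact absurd h (Nat.not_lt_zero _)
  | succ f ih =>
    intro w hlen
    by_cases hw : w = []
    · subst hw; simp [recA, segsB, buildB]
    · have hsplit := divideA_eq_splitB w
      cases hE : splitB w with
      | none =>
        have hA : divideA w = none := by rw [hsplit, hE]
        simp [recA, segsB, hw, hA, hE, buildB]
      | some uv =>
        obtain ⟨u, v⟩ := uv
        have hA : divideA w = some (u, v) := by rw [hsplit, hE]
        unfold splitB at hE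
        cases hS : splitLoopB w 0 0 with
        | none => rw [hS] at hE; exact absurd hE (by simp)
        | some s =>
          rw [hS] at hE
          obtain ⟨hs1, hs2⟩ := splitLoop_some w 0 0 s hS
          rw [Nat.zero_add] at hs2
          have hE2 : (if s = w.length - 1 then some (w, ([] : List Char))
              else some (w.take s, w.drop s)) = some (u, v) := hE
          have hrecA : recA (f + 1) w =
              (if isCorrectA u ≠ 0 then (if v ≠ [] then u ++ recA f v else u)
               else ('(' :: recA f v ++ [')']) ++
                 (if u.length > 3 then flipLoopA ((u.drop 1).take (u.length - 2)) else [])) := by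
            simp [recA, hw, hA]
          have hsegs : segsB (f + 1) w = u :: segsB f v := by
            have hB : splitB w = some (u, v) := by rw [← hsplit]; exact hA
            simp [segsB, hw, hB]
          have hcond : (isCorrectA u ≠ 0) ↔ (prefixOkB u = true) := by
            have := ic_iff_ok u 0
            simpa [isCorrectA, prefixOkB] using this
          have hvlen : v.length < f := by
            by_cases hs : s = w.length - 1
            · rw [if_pos hs] at hE2
              obtain ⟨he1, he2⟩ := Prod.mk.injEq .. ▸ Option.some.inj hE2
              rw [← he2]; simp; omega
            · rw [if_neg hs] at hE2
              obtain ⟨he1, he2⟩ := Prod.mk.injEq .. ▸ Option.some.inj hE2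
              rw [← he2]; rw [List.length_drop]; omega
          have hIH : recA f v = buildB (segsB f v) := ih v hvlen
          rw [hrecA, hsegs, buildB_cons]
          by_cases hc : isCorrectA u ≠ 0
          · rw [if_pos hc]
            have hok : prefixOkB u = true := hcond.mp hc
            unfold stepB
            rw [if_pos hok]
            by_cases hv : v = []
            · subst hv
              rw [if_neg (by simp), segsB_nil]
              simp [buildB]
            · rw [if_pos hv, hIH]
          · rw [if_neg hc]
            have hok : prefixOkB u = false := by
              rcases Bool.eq_false_or_eq_true (prefixOkB u) with h | h
              · exact absurd (hcond.mpr h) hc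
              · exact h
            have hflip : (if u.length > 3 then flipLoopA ((u.drop 1).take (u.length - 2)) else [])
                = (if u.length > 3 then
                    ((u.drop 1).take (u.length - 2)).map (fun c => if c = '(' then ')' else '(')
                  else []) := by
              by_cases hl : u.length > 3
              · rw [if_pos hl, if_pos hl, flipLoopA_eq_map]
              · rw [if_neg hl, if_neg hl]
            rw [hflip, hIH]
            simp [stepB, hok]

-- ===== VERDICT (by name: the statement is the Claim_ definition above) =====
theorem solution_spec : Claim_equal_solution := by
  intro p _ _
  exact congrArg String.mk (main_lemma (p.toList.length + 1) p.toList (Nat.lt_succ_self _))
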